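-- pv_equiv track=rewrite | github.com/cwza/leetcode | python/1593-Split a String Into the Max Number of Unique Substrings.py | allUniqueSplit
-- ===== SOURCE A (Python) =====
-- def allUniqueSplit(s):
--     result = []
--     table = {}
--     def helper(path, remains):
--         if len(remains) == 0:
--             result.append(path)
--         for i in range(1, len(remains)+1):
--             tmp = remains[:i]
--             if tmp in table:
--                 continue
--             table[tmp] = 1
--             helper(path[:]+[tmp], remains[i:])
--             del table[tmp]
--     helper([], s)
--     return result
-- ===== SOURCE B (Python) =====
-- def allUniqueSplit(s):
--     if not s:
--         return [[]]
--     # breadth-first sweep over the characters: each state is (closed pieces, current open piece);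
--     # before every later character we either cut (close the open piece) or extend it.
--     states = [([], s[0])]
--     for c in s[1:]:
--         nxt = []
--         for done, cur in states:
--             nxt.append((done + [cur], c))
--             nxt.append((done, cur + c))
--         states = nxt
--     result = []
--     for done, cur in states:
--         pieces = done + [cur]
--         if len(set(pieces)) == len(pieces):
--             result.append(pieces)
--     return result
-- ===== Notes on version B (the rewrite author's own statement) =====
-- stated objective: alternative
-- what changed: Replaced A's recursive backtracking (shared result list, path copying, dict insert/del undo with on-the-fly duplicate pruning) by an iterative breadth-first sweep: one pass over the characters maintaining a list of partial partitions, each branching into cut/extend, with a single duplicate filter at the end.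
import Mathlib
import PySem

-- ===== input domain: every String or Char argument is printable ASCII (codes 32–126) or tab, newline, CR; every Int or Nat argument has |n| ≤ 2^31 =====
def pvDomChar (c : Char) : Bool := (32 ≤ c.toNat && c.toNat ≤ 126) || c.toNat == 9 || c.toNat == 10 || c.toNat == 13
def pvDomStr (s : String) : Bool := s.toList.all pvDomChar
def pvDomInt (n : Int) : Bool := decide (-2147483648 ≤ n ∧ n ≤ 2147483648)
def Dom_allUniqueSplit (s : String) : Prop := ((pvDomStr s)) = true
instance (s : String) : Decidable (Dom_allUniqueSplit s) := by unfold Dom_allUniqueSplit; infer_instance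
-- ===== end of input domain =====

-- B replaces A's recursive backtracking (shared result list, dict insert/del undo) by an
-- iterative breadth-first sweep over the characters with a final duplicate filter; objective: alternative.

-- ===== PORT A =====
-- A's helper mutates a shared `result` and `table`; ported purely: the appended results are the
-- return value, and since `table[tmp]` is deleted right after the recursive call, each loop
-- iteration sees the original table, so the dict is passed functionally (insert for the call only).
-- remains[:i] / remains[i:] with 0 ≤ i ≤ len are exactly take/drop (PySem.List.slice_to/slice_from).
mutual
def auHelperA (path : List String) (remains : List Char) (table : PySem.Dict String Int) :
    List (List String) :=
  (if remains.length = 0 then [path] else []) ++ auLoopA path remains table 1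
  termination_by (remains.length, remains.length + 3)
  decreasing_by exact Prod.Lex.right _ (by omega)

-- the `for i in range(1, len(remains)+1)` loop, as structural recursion on i
def auLoopA (path : List String) (remains : List Char) (table : PySem.Dict String Int)
    (i : Nat) : List (List String) :=
  if 1 ≤ i ∧ i ≤ remains.length then
    let tmp := String.ofList (remains.take i)
    (if table.contains tmp then []
     else auHelperA (path ++ [tmp]) (remains.drop i) (table.insert tmp 1)) ++
    auLoopA path remains table (i + 1)
  else []
  termination_by (remains.length, remains.length + 2 - i)
  decreasing_by
  · exact Prod.Lex.left _ _ (by simp [List.length_drop]; omega)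
  · exact Prod.Lex.right _ (by omega)
end

def allUniqueSplit (s : String) : List (List String) :=
  auHelperA [] s.toList PySem.Dict.empty

-- ===== PORT B =====
-- Source B: states are pairs (done pieces, current open piece cur : str, kept as List Char);
-- one fold over s[1:] branches every state into (cut before c, extend cur with c);
-- the final loop closes cur and keeps the partition iff len(set(pieces)) == len(pieces).
def allUniqueSplit_alt (s : String) : List (List String) :=
  match s.toList with
  | [] => [[]]
  | c :: cs =>
    let states :=
      cs.foldl
        (fun states c =>
          states.foldl
            (fun nxt dc => nxt ++ [(dc.1 ++ [String.ofList dc.2], [c]), (dc.1, dc.2 ++ [c])])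
            [])
        [(([] : List String), [c])]
    states.foldl
      (fun result dc =>
        let pieces := dc.1 ++ [String.ofList dc.2]
        if PySem.Set.len (PySem.Set.ofList pieces) = PySem.List.len pieces
        then result ++ [pieces] else result)
      []

-- ===== PRECONDITION & SPEC =====
def Spec_allUniqueSplit (s : String) (out : List (List String)) : Prop := out = allUniqueSplit_alt s
instance (s : String) (out : List (List String)) : Decidable (Spec_allUniqueSplit s out) := by unfold Spec_allUniqueSplit; infer_instance

-- ===== CLAIM (what is proved, stated in full; the proofs are below) =====
def Claim_equal_allUniqueSplit : Prop := ∀ (s : String), Dom_allUniqueSplit s → Spec_allUniqueSplit s (allUniqueSplit s)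

-- ===== LEMMAS AND PROOFS =====

-- Common specification: all splits of a suffix, in A's DFS / B's breadth-first order
-- (lexicographic by piece lengths).  `auExt cur rest` = all splits of cur++rest whose first
-- piece extends cur.
def auExt (cur : List Char) (rest : List Char) : List (List String) :=
  match rest with
  | [] => [[String.ofList cur]]
  | c :: cs => (auExt [c] cs).map (String.ofList cur :: ·) ++ auExt (cur ++ [c]) cs

def auSplits (l : List Char) : List (List String) :=
  match l with
  | [] => [[]]
  | c :: cs => auExt [c] cs

-- A's pruning predicate: pieces pairwise distinct and none already in the table
def auPred (table : PySem.Dict String Int) (ps : List String) : Bool :=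
  decide ps.Nodup && ps.all (fun p => !table.contains p)

theorem auPred_nil (table : PySem.Dict String Int) : auPred table [] = true := by
  simp [auPred]

theorem auPred_cons (table : PySem.Dict String Int) (tmp : String) (r : List String) :
    auPred table (tmp :: r) = (!table.contains tmp && auPred (table.insert tmp 1) r) := by
  rw [Bool.eq_iff_iff]
  simp [auPred, List.all_eq_true, PySem.Dict.contains_insert, List.nodup_cons]
  constructor
  · rintro ⟨⟨h1, h2⟩, h3, h4⟩
    exact ⟨h3, h2, fun p hp => ⟨fun he => h1 (he ▸ hp), h4 p hp⟩⟩
  · rintro ⟨h3, h2, h4⟩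
    exact ⟨⟨fun hm => (h4 tmp hm).1 rfl, h2⟩, h3, fun p hp => (h4 p hp).2⟩

theorem auFilter_map_cons (table : PySem.Dict String Int) (tmp : String)
    (X : List (List String)) :
    (X.map (tmp :: ·)).filter (auPred table)
      = if table.contains tmp then []
        else (X.filter (auPred (table.insert tmp 1))).map (tmp :: ·) := by
  rw [List.filter_map]
  by_cases hc : table.contains tmp
  · rw [if_pos hc]
    have : (auPred table ∘ (tmp :: ·)) = fun _ => false := by
      funext r; simp [Function.comp, auPred_cons, hc]
    rw [this]
    simp
  · rw [if_neg hc]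
    congr 1
    apply List.filter_congr
    intro r _
    simp [Function.comp, auPred_cons, hc]

theorem auLoopA_stop (path : List String) (remains : List Char)
    (table : PySem.Dict String Int) (i : Nat) (h : remains.length < i) :
    auLoopA path remains table i = [] := by
  rw [auLoopA]
  simp only [if_neg (by omega : ¬ (1 ≤ i ∧ i ≤ remains.length))]

-- Main invariant: A's helper returns the pruned splits of `remains` with `path` prepended.
mutual
theorem auHelperA_spec (path : List String) (remains : List Char)
    (table : PySem.Dict String Int) :
    auHelperA path remains table
      = ((auSplits remains).filter (auPred table)).map (path ++ ·) := by
  rw [auHelperA]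
  match remains with
  | [] =>
    rw [auLoopA_stop path [] table 1 (by simp)]
    simp [auSplits, auPred_nil]
  | c :: cs =>
    rw [auLoopA_spec path (c :: cs) table 1 (by simp)]
    simp [auSplits]
  termination_by (remains.length, remains.length + 3)
  decreasing_by all_goals exact Prod.Lex.right _ (by omega)

theorem auLoopA_spec (path : List String) (remains : List Char)
    (table : PySem.Dict String Int) (i : Nat) (hi : 1 ≤ i ∧ i ≤ remains.length) :
    auLoopA path remains table i
      = ((auExt (remains.take i) (remains.drop i)).filter (auPred table)).map (path ++ ·) := by
  rw [auLoopA, if_pos hi]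
  dsimp only
  by_cases hlt : i < remains.length
  · -- drop i = remains[i] :: drop (i+1)
    have hdrop : remains.drop i = remains[i] :: remains.drop (i + 1) :=
      List.drop_eq_getElem_cons hlt
    have htake : remains.take i ++ [remains[i]] = remains.take (i + 1) := by
      rw [List.take_add_one, List.getElem?_eq_getElem hlt]
      rfl
    rw [auLoopA_spec path remains table (i + 1) (by omega),
        auHelperA_spec (path ++ [String.ofList (remains.take i)]) (remains.drop i)
          (table.insert (String.ofList (remains.take i)) 1)]
    conv_rhs => rw [hdrop]
    rw [auExt, htake, List.filter_append, List.map_append]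
    congr 1
    rw [auFilter_map_cons]
    by_cases hc : table.contains (String.ofList (remains.take i))
    · simp [hc]
    · rw [if_neg hc, if_neg hc]
      have hsp : auSplits (remains.drop i) = auExt [remains[i]] (remains.drop (i + 1)) := by
        rw [hdrop]; rfl
      rw [hsp, List.map_map]
      simp [Function.comp_def]
  · -- i = length: last iteration, drop i = []
    have hieq : i = remains.length := by omega
    have hdrop : remains.drop i = [] := by simp [hieq]
    rw [auLoopA_stop path remains table (i + 1) (by omega),
        auHelperA_spec (path ++ [String.ofList (remains.take i)]) (remains.drop i)
          (table.insert (String.ofList (remains.take i)) 1)]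
    rw [hdrop, auExt]
    by_cases hc : table.contains (String.ofList (remains.take i))
    · simp [hc, List.filter, auPred]
    · simp [hc, List.filter, auPred, auSplits]
  termination_by (remains.length, remains.length + 2 - i)
  decreasing_by
  · exact Prod.Lex.right _ (by omega)
  · exact Prod.Lex.left _ _ (by simp [List.length_drop]; omega)
  · exact Prod.Lex.left _ _ (by simp [List.length_drop]; omega)
end

-- ---- B side ----

-- one breadth-first step of Source B's fold, in flatMap form
theorem auStepB_eq (states : List (List String × List Char)) (c : Char) :
    states.foldl
        (fun nxt dc => nxt ++ [(dc.1 ++ [String.ofList dc.2], [c]), (dc.1, dc.2 ++ [c])]) []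
      = states.flatMap (fun dc => [(dc.1 ++ [String.ofList dc.2], [c]), (dc.1, dc.2 ++ [c])]) := by
  rw [PySem.List.foldl_append_eq_flatMap]
  rfl

-- closing every state after the whole sweep yields auExt of each initial state
theorem auFold_spec (cs : List Char) (sts : List (List String × List Char)) :
    (cs.foldl
        (fun states c =>
          states.foldl
            (fun nxt dc => nxt ++ [(dc.1 ++ [String.ofList dc.2], [c]), (dc.1, dc.2 ++ [c])])
            [])
        sts).flatMap (fun dc => [dc.1 ++ [String.ofList dc.2]])
      = sts.flatMap (fun dc => (auExt dc.2 cs).map (dc.1 ++ ·)) := by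
  induction cs generalizing sts with
  | nil => simp [auExt]
  | cons c cs ih =>
    rw [List.foldl_cons, ih, auStepB_eq, List.flatMap_assoc]
    congr 1
    funext dc
    rw [auExt]
    simp [List.map_map, Function.comp_def, List.append_assoc]

-- Source B's final loop: keep exactly the closed states passing the duplicate check
theorem auFinal_eq (l : List (List String × List Char)) (acc : List (List String)) :
    l.foldl
        (fun result dc =>
          let pieces := dc.1 ++ [String.ofList dc.2]
          if PySem.Set.len (PySem.Set.ofList pieces) = PySem.List.len pieces
          then result ++ [pieces] else result)
        acc
      = acc ++ (l.flatMap (fun dc => [dc.1 ++ [String.ofList dc.2]])).filter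
          (fun ps => decide (PySem.Set.len (PySem.Set.ofList ps) = PySem.List.len ps)) := by
  induction l generalizing acc with
  | nil => simp
  | cons dc l ih =>
    rw [List.foldl_cons]
    dsimp only
    by_cases h : PySem.Set.len (PySem.Set.ofList (dc.1 ++ [String.ofList dc.2]))
        = PySem.List.len (dc.1 ++ [String.ofList dc.2])
    · have h' : (PySem.Set.ofList (dc.1 ++ [String.ofList dc.2])).length
          = (dc.1 ++ [String.ofList dc.2]).length := by
        simp only [PySem.Set.len, PySem.List.len] at h
        omega
      rw [if_pos h, ih]
      simp [h']
    · have h' : ¬ (PySem.Set.ofList (dc.1 ++ [String.ofList dc.2])).length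
          = dc.1.length + 1 := by
        simp only [PySem.Set.len, PySem.List.len, List.length_append,
          List.length_cons, List.length_nil] at h
        omega
      rw [if_neg h, ih]
      simp [h']

-- len(set(ps)) == len(ps) tests exactly Nodup
theorem auLen_foldl_add_le {a : Type} [BEq a] (l : List a) (s : PySem.Set a) :
    (l.foldl PySem.Set.add s).length <= s.length + l.length := by
  induction l generalizing s with
  | nil => simp
  | cons x l ih =>
    rw [List.foldl_cons]
    refine le_trans (ih (s.add x)) ?_
    have hle : (s.add x).length <= s.length + 1 := by
      simp only [PySem.Set.add]
      split
      · simp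
      · simp
    simp only [List.length_cons]
    omega

theorem auLen_foldl_add_eq {a : Type} [BEq a] [LawfulBEq a] (l : List a) (s : PySem.Set a) :
    ((l.foldl PySem.Set.add s).length = s.length + l.length)
      ↔ (l.Nodup ∧ ∀ x ∈ l, x ∉ s) := by
  induction l generalizing s with
  | nil => simp
  | cons x l ih =>
    rw [List.foldl_cons]
    by_cases hx : x ∈ s
    · have hadd : s.add x = s := by
        simp only [PySem.Set.add, PySem.Set.contains]
        rw [if_pos (by simpa using hx)]
      rw [hadd]
      constructor
      · intro h
        exfalso
        have := auLen_foldl_add_le l s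
        simp only [List.length_cons] at h
        omega
      · rintro ⟨-, hall⟩
        exact absurd hx (hall x (by simp))
    · have hadd : s.add x = s ++ [x] := by
        simp only [PySem.Set.add, PySem.Set.contains]
        rw [if_neg (by simpa using hx)]
      rw [hadd]
      have hlen : (s ++ [x]).length = s.length + 1 := by simp
      constructor
      · intro h
        have h' : (l.foldl PySem.Set.add (s ++ [x])).length = (s ++ [x]).length + l.length := by
          simp only [List.length_cons] at h
          omega
        obtain ⟨hnd, hni⟩ := (ih (s ++ [x])).mp h'
        refine ⟨List.nodup_cons.mpr ⟨fun hm => ?_, hnd⟩, ?_⟩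
        · exact (hni x hm) (by simp)
        · intro y hy
          rcases List.mem_cons.mp hy with rfl | hy'
          · exact hx
          · intro hys
            exact (hni y hy') (by simp [hys])
      · intro h
        obtain ⟨hnd, hni⟩ := h
        obtain ⟨hxl, hnd'⟩ := List.nodup_cons.mp hnd
        have h' : (l.foldl PySem.Set.add (s ++ [x])).length = (s ++ [x]).length + l.length := by
          refine (ih (s ++ [x])).mpr ⟨hnd', ?_⟩
          intro y hy
          simp only [List.mem_append, List.mem_singleton]
          rintro (hys | rfl)
          · exact (hni y (List.mem_cons_of_mem _ hy)) hys
          · exact hxl hy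
        simp only [List.length_cons]
        omega

theorem auNodup_len (ps : List String) :
    ((PySem.Set.ofList ps).length = ps.length) ↔ ps.Nodup := by
  have h0 := auLen_foldl_add_eq ps (PySem.Set.empty : PySem.Set String)
  simp [PySem.Set.ofList, PySem.Set.empty] at h0 ⊢
  exact h0

-- the duplicate check agrees with A's pruning predicate over the empty table
theorem auCheck_eq_pred (ps : List String) :
    decide (PySem.Set.len (PySem.Set.ofList ps) = PySem.List.len ps)
      = auPred PySem.Dict.empty ps := by
  rw [Bool.eq_iff_iff]
  simp [auPred, List.all_eq_true, PySem.Dict.contains_empty, PySem.Set.len, PySem.List.len]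
  exact auNodup_len ps

-- ===== VERDICT (by name: the statement is the Claim_ definition above) =====
theorem allUniqueSplit_spec : Claim_equal_allUniqueSplit := by
  intro s _
  unfold Spec_allUniqueSplit
  cases hs : s.toList with
  | nil =>
    simp only [allUniqueSplit, allUniqueSplit_alt, hs]
    rw [auHelperA_spec]
    simp [auSplits, auPred_nil]
  | cons c cs =>
    simp only [allUniqueSplit, allUniqueSplit_alt, hs]
    rw [auHelperA_spec, auFinal_eq, auFold_spec]
    simp only [List.flatMap_cons, List.flatMap_nil, List.append_nil, List.nil_append,
      auSplits]
    rw [List.filter_congr (fun ps _ => auCheck_eq_pred ps)]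
    simp
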